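-- pv_equiv track=rewrite | github.com/shenwanxiang/aggmap-megma | MEGMA/02_Disease_sets-2/Met2Img_deepmg_code/vis_data.py | coordinates_fillup
-- ===== SOURCE A (Python) =====
-- import math
--
-- def coordinates_fillup (num_features):
--     '''
--     generating coordinates for fill-up based on the number of features
--     '''
--     cordi_x = []
--     cordi_y = []
--     #build coordinates for fill-up with a square of len_square*len_square
--     len_square = int(math.ceil(math.sqrt(num_features)))
--     print ('square_fit_features=' + str(len_square) )
--     k = 0
--     for i in range(0,len_square):
--         for j in range(0,len_square):
--             if k == (num_features):
--                 break
--             else: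
--                 cordi_x.append(j*(-1))
--                 cordi_y.append(i*(-1))
--                 k = k+1
--         if k == (num_features):
--             break
--     print ('#features=' +str(k))
--     return cordi_x, cordi_y
-- ===== SOURCE B (Python) =====
-- import math
--
-- def coordinates_fillup(num_features):
--     '''
--     generating coordinates for fill-up based on the number of features
--     '''
--     len_square = int(math.ceil(math.sqrt(num_features)))
--     print('square_fit_features=' + str(len_square))
--     cordi_x = []
--     cordi_y = []
--     for k in range(num_features):
--         cordi_x.append(-(k % len_square))
--         cordi_y.append(-(k // len_square))
--     print('#features=' + str(num_features))
--     return cordi_x, cordi_y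
-- ===== Notes on version B (the rewrite author's own statement) =====
-- stated objective: simpler
-- what changed: Replaced the nested i/j grid loops with two break checks and a manual counter by a single flat loop over range(num_features) computing each coordinate directly as (-(k % len_square), -(k // len_square)).
import Mathlib
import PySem

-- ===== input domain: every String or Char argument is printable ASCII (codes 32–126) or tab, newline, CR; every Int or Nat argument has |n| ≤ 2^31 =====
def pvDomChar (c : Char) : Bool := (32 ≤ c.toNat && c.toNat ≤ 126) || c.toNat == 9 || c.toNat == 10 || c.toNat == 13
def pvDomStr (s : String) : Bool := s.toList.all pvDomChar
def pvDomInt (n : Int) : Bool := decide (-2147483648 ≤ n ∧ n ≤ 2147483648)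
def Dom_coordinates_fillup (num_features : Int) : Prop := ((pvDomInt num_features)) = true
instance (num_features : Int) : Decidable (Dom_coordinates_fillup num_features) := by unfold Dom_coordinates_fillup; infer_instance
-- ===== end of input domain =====

-- B replaces A's nested i/j loops with breaks by one flat loop computing -(k % L), -(k // L); objective: simpler.
-- Equivalence is about the RETURN value only (both Pythons also print; the prints are identical).

-- ===== PORT A =====
-- int(math.ceil(math.sqrt(n))) for 0 ≤ n ≤ 2^31 (exact on that domain: the double sqrt is correctly rounded there)
def pyCeilSqrt (n : Int) : Int :=
  if Nat.sqrt n.toNat * Nat.sqrt n.toNat = n.toNat then (Nat.sqrt n.toNat : Int)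
  else (Nat.sqrt n.toNat : Int) + 1

-- body of the inner j-loop (break modelled as skipping once k = num_features)
def fillStep (n i : Int) (st : List Int × List Int × Int) (j : Int) : List Int × List Int × Int :=
  if st.2.2 = n then st
  else (st.1 ++ [j * (-1)], st.2.1 ++ [i * (-1)], st.2.2 + 1)

def coordinates_fillup (num_features : Int) : List Int × List Int :=
  let len_square := pyCeilSqrt num_features
  let st := (PySem.List.pyRange 0 len_square 1).foldl
      (fun st i => (PySem.List.pyRange 0 len_square 1).foldl (fillStep num_features i) st)
      (([], [], 0) : List Int × List Int × Int)
  (st.1, st.2.1)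

-- ===== PORT B =====
def coordinates_fillup_alt (num_features : Int) : List Int × List Int :=
  let len_square := pyCeilSqrt num_features
  let ks := PySem.List.pyRange 0 num_features 1
  (ks.map (fun k => -(PySem.Int.mod k len_square)),
   ks.map (fun k => -(PySem.Int.floordiv k len_square)))

-- ===== PRECONDITION & SPEC =====
-- Pre_ excludes negative num_features, on which Python's math.sqrt raises ValueError.
def Pre_coordinates_fillup (num_features : Int) : Prop := 0 ≤ num_features
instance (num_features : Int) : Decidable (Pre_coordinates_fillup num_features) := by
  unfold Pre_coordinates_fillup; infer_instance
def pvWitness_coordinates_fillup : Int := (7)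

def Spec_coordinates_fillup (num_features : Int) (out : List Int × List Int) : Prop := out = coordinates_fillup_alt num_features
instance (num_features : Int) (out : List Int × List Int) : Decidable (Spec_coordinates_fillup num_features out) := by unfold Spec_coordinates_fillup; infer_instance

-- ===== CLAIM (what is proved, stated in full; the proofs are below) =====
def Claim_equal_coordinates_fillup : Prop := ∀ (num_features : Int), Dom_coordinates_fillup num_features → Pre_coordinates_fillup num_features → Spec_coordinates_fillup num_features (coordinates_fillup num_features)

-- ===== LEMMAS AND PROOFS =====

-- inner loop: appends -(0..t-1) to cx and t copies of -i to cy, t = min |js| (n-k)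
theorem inner_spec (n i : Int) : ∀ (js : List Int) (cx cy : List Int) (k : Int), k ≤ n →
    js.foldl (fillStep n i) (cx, cy, k)
      = (cx ++ ((js.take (n - k).toNat).map (fun j => j * (-1))),
         cy ++ List.replicate (min js.length (n - k).toNat) (i * (-1)),
         k + (min js.length (n - k).toNat : Nat)) := by
  intro js
  induction js with
  | nil => intro cx cy k hk; simp
  | cons j js ih =>
    intro cx cy k hk
    by_cases h : k = n
    · have ht : (n - k).toNat = 0 := by omega
      simp only [List.foldl_cons, fillStep, h]
      have := ih cx cy n (le_refl n)
      simp at this ⊢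
      simpa [h, ht] using this
    · have hk1 : k + 1 ≤ n := by omega
      have ht : (n - k).toNat = (n - (k + 1)).toNat + 1 := by omega
      simp only [List.foldl_cons, fillStep, if_neg h]
      rw [ih (cx ++ [j * (-1)]) (cy ++ [i * (-1)]) (k + 1) hk1]
      have hmin1 : min (js.length + 1) ((n - (k + 1)).toNat + 1)
          = min js.length (n - (k + 1)).toNat + 1 := by omega
      refine Prod.ext ?_ (Prod.ext ?_ ?_)
      · simp [ht, List.append_assoc]
      · simp only [ht, List.length_cons, hmin1, List.replicate_succ]
        simp [List.append_assoc]
      · simp only [List.length_cons, ht, hmin1]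
        push_cast
        ring

-- outer loop invariant, in Nat form
theorem outer_spec (m Lnat : Nat) : ∀ (i : Nat), i ≤ Lnat →
    (PySem.List.pyRange 0 (i : Int) 1).foldl
        (fun st ii => (PySem.List.pyRange 0 (Lnat : Int) 1).foldl (fillStep (m : Int) ii) st)
        (([], [], 0) : List Int × List Int × Int)
      = ((List.range (min m (Lnat * i))).map (fun t => -((t % Lnat : Nat) : Int)),
         (List.range (min m (Lnat * i))).map (fun t => -((t / Lnat : Nat) : Int)),
         ((min m (Lnat * i) : Nat) : Int)) := by
  intro i
  induction i with
  | zero => intro _; simp [PySem.List.pyRange_zero_nat]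
  | succ i ih =>
    intro hle
    have hi : ((i : Int) + 1) = ((i + 1 : Nat) : Int) := by push_cast; ring
    rw [← hi, PySem.List.pyRange_one_succ_right (by positivity), List.foldl_append,
      ih (by omega)]
    set k0 := min m (Lnat * i) with hk0
    have hk0n : (k0 : Int) ≤ (m : Int) := by exact_mod_cast Nat.min_le_left _ _
    simp only [List.foldl_cons, List.foldl_nil]
    rw [inner_spec (m : Int) (i : Int) _ _ _ _ hk0n]
    have hlen : (PySem.List.pyRange 0 (Lnat : Int) 1).length = Lnat := by
      rw [PySem.List.length_pyRange_one]; omega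
    have htn : ((m : Int) - (k0 : Int)).toNat = m - k0 := by omega
    set s := min Lnat (m - k0) with hs
    have hmul : Lnat * (i + 1) = Lnat * i + Lnat := by ring
    have hmin : min m (Lnat * (i + 1)) = k0 + s := by omega
    have hrange : PySem.List.pyRange 0 (Lnat : Int) 1
        = (List.range Lnat).map (fun t : Nat => (t : Int)) := by
      rw [PySem.List.pyRange_one]
      simp only [sub_zero, Int.toNat_natCast, zero_add]
    have htake : (PySem.List.pyRange 0 (Lnat : Int) 1).take (m - k0)
        = (List.range s).map (fun t : Nat => (t : Int)) := by
      rw [hrange, ← List.map_take, List.take_range]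
      have hms : min (m - k0) Lnat = s := by omega
      rw [hms]
    refine Prod.ext ?_ (Prod.ext ?_ ?_)
    · -- cx component
      simp only [htn, htake, hmin]
      rw [List.range_add, List.map_append, List.map_map, List.map_map]
      congr 1
      apply List.map_congr_left
      intro j hj
      simp only [List.mem_range] at hj
      have hij : k0 = Lnat * i := by
        have h1 : Lnat * i < m := by omega
        omega
      have hjL : j < Lnat := by omega
      have hmod : (k0 + j) % Lnat = j := by
        rw [hij, Nat.mul_add_mod, Nat.mod_eq_of_lt hjL]
      simp only [Function.comp, hmod]
      ring
    · -- cy component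
      simp only [hlen, htn, ← hs, hmin]
      rw [List.range_add, List.map_append, List.map_map]
      congr 1
      symm
      refine List.eq_replicate_iff.mpr ⟨?_, ?_⟩
      · rw [List.length_map, List.length_range]
      intro b hb
      simp only [List.mem_map, List.mem_range] at hb
      obtain ⟨j, hj, rfl⟩ := hb
      have hij : k0 = Lnat * i := by
        have h1 : Lnat * i < m := by omega
        omega
      have hLpos : 0 < Lnat := by omega
      have hdiv : (k0 + j) / Lnat = i := by
        rw [hij, Nat.mul_add_div hLpos, Nat.div_eq_of_lt (by omega)]
        omega
      simp only [Function.comp, hdiv]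
      ring
    · -- counter component
      simp only [hlen, htn, ← hs, hmin]
      push_cast
      ring

theorem ceil_sqrt_sq (n : Int) (_hn : 0 ≤ n) :
    n.toNat ≤ (pyCeilSqrt n).toNat * (pyCeilSqrt n).toNat ∧ 0 ≤ pyCeilSqrt n := by
  unfold pyCeilSqrt
  split
  · constructor
    · simp only [Int.toNat_natCast]; omega
    · positivity
  · have h1 := Nat.sqrt_le n.toNat
    have h2 := Nat.lt_succ_sqrt n.toNat
    simp only [Nat.succ_eq_add_one] at h2
    constructor
    · have h3 : ((Nat.sqrt n.toNat : Int) + 1).toNat = Nat.sqrt n.toNat + 1 := by omega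
      rw [h3]
      omega
    · positivity

-- ===== VERDICT (by name: the statement is the Claim_ definition above) =====
theorem coordinates_fillup_spec : Claim_equal_coordinates_fillup := by
  intro n _ hpre
  unfold Spec_coordinates_fillup coordinates_fillup coordinates_fillup_alt
  have hpre' : (0 : Int) ≤ n := hpre
  obtain ⟨hle, hL0⟩ := ceil_sqrt_sq n hpre'
  set Lnat := (pyCeilSqrt n).toNat with hLnat
  have hL : pyCeilSqrt n = (Lnat : Int) := by omega
  set m := n.toNat with hm
  have hn' : n = (m : Int) := by omega
  rw [hL, hn']
  dsimp only
  rw [outer_spec m Lnat Lnat (le_refl _)]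
  have hmin : min m (Lnat * Lnat) = m := by omega
  rw [hmin]
  have hrange : PySem.List.pyRange 0 (m : Int) 1 = (List.range m).map (fun t : Nat => (t : Int)) := by
    rw [PySem.List.pyRange_one]
    simp only [sub_zero, Int.toNat_natCast, zero_add]
  rw [hrange]
  refine Prod.ext ?_ ?_
  · simp only [List.map_map]
    apply List.map_congr_left
    intro t _
    simp [Function.comp, PySem.Int.mod_natCast]
  · simp only [List.map_map]
    apply List.map_congr_left
    intro t _
    simp [Function.comp, PySem.Int.floordiv_natCast]
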